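-- pv_equiv track=rewrite | github.com/SemenSpurt/PerformanceLab | task1/task1.py | path_calc
-- ===== SOURCE A (Python) =====
-- def path_calc(n: int , m: int ) -> int:
--     if n < 1 or m < 1:
--         raise ValueError('Arguments must be positive integers')
--
--     else:
--         seq = list(range(1, n + 1))
--
--         path = [1]
--         nx_el = m - 1
--         n_elem = len(seq)
--
--         while seq[nx_el % n_elem] != 1:
--
--             path.append(str(seq[nx_el % n_elem]))
--             nx_el += m - 1
--
--         else:
--             return int("".join([str(i) for i in path]))
-- ===== SOURCE B (Python) =====
-- def path_calc(n: int, m: int) -> int: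
--     if n < 1 or m < 1:
--         raise ValueError('Arguments must be positive integers')
--
--     def gcd(a, b):
--         return a if b == 0 else gcd(b, a % b)
--
--     d = m - 1
--     # the walk visits exactly n // gcd(n, d) positions before returning to 1
--     count = n // gcd(n, d)
--
--     def seg(lo, hi):
--         # decimal digits of the labels of steps lo..hi-1 (label of step k is k*d % n + 1),
--         # assembled by balanced divide and conquer; each label is computed independently
--         if hi - lo == 1:
--             return str(lo * d % n + 1)
--         mid = (lo + hi) // 2
--         return seg(lo, mid) + seg(mid, hi)
--
--     return int(seg(0, count))
-- ===== Notes on version B (the rewrite author's own statement) =====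
-- stated objective: alternative
-- what changed: B replaces A's stateful walk over the materialised list range(1, n+1) (unbounded running index, stop on return to element 1) by computing the number of visited positions up front as n // gcd(n, m-1), computing each visited label independently with the closed form k*(m-1) % n + 1, and assembling the digit string by balanced divide-and-conquer recursion instead of sequential appends.
import Mathlib
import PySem

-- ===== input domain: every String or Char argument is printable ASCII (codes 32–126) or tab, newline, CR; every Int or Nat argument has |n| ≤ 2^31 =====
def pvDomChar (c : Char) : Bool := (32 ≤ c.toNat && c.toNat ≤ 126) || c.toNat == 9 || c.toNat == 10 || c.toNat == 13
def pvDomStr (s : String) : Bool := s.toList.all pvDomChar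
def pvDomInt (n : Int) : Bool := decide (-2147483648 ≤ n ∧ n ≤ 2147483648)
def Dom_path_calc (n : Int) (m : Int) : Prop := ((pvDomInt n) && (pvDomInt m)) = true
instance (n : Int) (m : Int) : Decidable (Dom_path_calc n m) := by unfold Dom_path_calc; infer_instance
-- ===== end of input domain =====

-- B computes the number of visited positions up front as n / gcd(n, m-1), computes each
-- position independently by the closed form k*(m-1) % n, and assembles the digit string by
-- balanced divide-and-conquer recursion, instead of A's stateful walk over the list 1..n
-- that detects the return to element 1 (objective: alternative).


-- ===== PORT A =====
-- A's while loop: seq[i] = i+1, so 'seq[nx % n_elem] != 1' is 'nx % nElem + 1 ≠ 1';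
-- nx_el stays ≥ 0 (m ≥ 1 on Pre_), so Nat state is exact. fuel = nElem is a pure
-- totality guard: the walk returns to element 1 within nElem steps (proved below).
def pathCalcLoopA (nElem step : Nat) : Nat → Nat → List String → List String
  | 0, _, path => path
  | fuel+1, nx, path =>
    if nx % nElem + 1 ≠ 1 then
      pathCalcLoopA nElem step fuel (nx + step) (path ++ [PySem.Int.toStr ((nx % nElem : Nat) + 1)])
    else path

def path_calc (n : Int) (m : Int) : Int :=
  if n < 1 ∨ m < 1 then 0  -- Python raises ValueError here; excluded by Pre_path_calc
  else
    let nElem := n.toNat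
    let step := (m - 1).toNat
    -- path = [1]; in the join str(1) = "1"
    let path := pathCalcLoopA nElem step nElem step ["1"]
    -- int("".join(...)): always a nonempty digit string, so ofStr? is some
    (PySem.Int.ofStr? (PySem.Str.join "" path)).getD 0

-- ===== PORT B =====
-- Source B's recursive gcd; the second argument strictly decreases, so fuel = b (passed at the
-- call site) is a pure totality guard that is never exhausted
def gcdB : Nat → Nat → Nat → Nat
  | _, a, 0 => a
  | 0, a, _+1 => a
  | fuel+1, a, b+1 => gcdB fuel (b+1) (a % (b+1))

-- Source B's seg(lo, hi): the decimal digits (str ported at the List Char level, exact on digits)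
-- of the labels of steps lo..hi-1, by balanced divide and conquer. Source B only calls it with
-- lo < hi and each half is strictly smaller, so fuel = hi - lo at the top call is a pure
-- totality guard (as is the 'hi ≤ lo → []' branch); neither is ever hit.
def segB (nN d : Nat) : Nat → Nat → Nat → List Char
  | 0, _, _ => []
  | fuel+1, lo, hi =>
    if hi - lo = 1 then PySem.Int.toChars ((lo * d % nN : Nat) + 1)
    else if hi ≤ lo then []
    else segB nN d fuel lo ((lo + hi) / 2) ++ segB nN d fuel ((lo + hi) / 2) hi

def path_calc_alt (n : Int) (m : Int) : Int :=
  if n < 1 ∨ m < 1 then 0  -- Python raises ValueError here; excluded by Pre_path_calc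
  else
    let nN := n.toNat
    let d := (m - 1).toNat
    let count := nN / gcdB d nN d
    -- int(seg(0, count)): a nonempty digit string, so ofChars? is some
    (PySem.Int.ofChars? (segB nN d count 0 count)).getD 0

-- ===== PRECONDITION & SPEC =====
-- A raises ValueError exactly when n < 1 or m < 1
def Pre_path_calc (n : Int) (m : Int) : Prop := 1 ≤ n ∧ 1 ≤ m
instance (n : Int) (m : Int) : Decidable (Pre_path_calc n m) := by unfold Pre_path_calc; infer_instance
def pvWitness_path_calc : Int × Int := (5, 3)

def Spec_path_calc (n : Int) (m : Int) (out : Int) : Prop := out = path_calc_alt n m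
instance (n : Int) (m : Int) (out : Int) : Decidable (Spec_path_calc n m out) := by unfold Spec_path_calc; infer_instance

-- ===== CLAIM (what is proved, stated in full; the proofs are below) =====
def Claim_equal_path_calc : Prop := ∀ (n : Int) (m : Int), Dom_path_calc n m → Pre_path_calc n m → Spec_path_calc n m (path_calc n m)

-- ===== LEMMAS AND PROOFS =====

theorem gcdB_eq : ∀ (fuel a b : Nat), b ≤ fuel → gcdB fuel a b = Nat.gcd a b := by
  intro fuel
  induction fuel with
  | zero =>
    intro a b hb
    have : b = 0 := by omega
    subst this
    simp [gcdB, Nat.gcd_zero_right]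
  | succ fuel ih =>
    intro a b hb
    cases b with
    | zero => simp [gcdB, Nat.gcd_zero_right]
    | succ c =>
      rw [gcdB, ih (c + 1) (a % (c + 1)) (by
        have := Nat.mod_lt a (y := c + 1) (by omega)
        omega)]
      rw [Nat.gcd_comm (c + 1) (a % (c + 1)), ← Nat.gcd_rec (c + 1) a, Nat.gcd_comm (c + 1) a]

-- the string appended at step k of the walk, and its characters
def walkStr (nN d k : Nat) : String := PySem.Int.toStr (((k * d) % nN : Nat) + 1)
def walkChars (nN d k : Nat) : List Char := PySem.Int.toChars (((k * d) % nN : Nat) + 1)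

theorem walkStr_toList (nN d k : Nat) : (walkStr nN d k).toList = walkChars nN d k := by
  simp [walkStr, walkChars, PySem.Int.toList_toStr]

theorem dvd_iff_cycle (nN d : Nat) (hn : 0 < nN) (k : Nat) :
    nN ∣ k * d ↔ (nN / Nat.gcd nN d) ∣ k := by
  set g := Nat.gcd nN d with hg
  have hg0 : 0 < g := Nat.gcd_pos_of_pos_left d hn
  have hnd : g ∣ nN := Nat.gcd_dvd_left nN d
  have hdd : g ∣ d := Nat.gcd_dvd_right nN d
  have hco : Nat.Coprime (nN / g) (d / g) := Nat.coprime_div_gcd_div_gcd hg0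
  constructor
  · intro h
    have h2 : g * (nN / g) ∣ k * (g * (d / g)) := by
      rwa [Nat.mul_div_cancel' hnd, Nat.mul_div_cancel' hdd]
    have h3 : (nN / g) ∣ k * (d / g) := by
      refine (Nat.mul_dvd_mul_iff_left hg0).mp ?_
      calc g * (nN / g) ∣ k * (g * (d / g)) := h2
        _ = g * (k * (d / g)) := by ring
    exact hco.dvd_of_dvd_mul_right h3
  · intro h
    have h2 : nN ∣ k * d ↔ g * (nN / g) ∣ k * d := by
      rw [Nat.mul_div_cancel' hnd]
    rw [h2]
    obtain ⟨c, hc⟩ := h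
    refine ⟨c * (d / g), ?_⟩
    rw [hc]
    calc (nN / g * c) * d = (nN / g * c) * (g * (d / g)) := by rw [Nat.mul_div_cancel' hdd]
      _ = g * (nN / g) * (c * (d / g)) := by ring

theorem loopA_spec (nN d : Nat) (hn : 0 < nN) (L : Nat)
    (hL : L = nN / Nat.gcd nN d) :
    ∀ (fuel j : Nat) (path : List String), 1 ≤ j → j ≤ L → L - j ≤ fuel →
    pathCalcLoopA nN d fuel (j * d) path
      = path ++ (List.range' j (L - j)).map (walkStr nN d) := by
  have hdvd := dvd_iff_cycle nN d hn
  intro fuel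
  induction fuel with
  | zero =>
    intro j path _ hjL hf
    have : L - j = 0 := Nat.le_zero.mp hf
    simp [pathCalcLoopA, this]
  | succ fuel ih =>
    intro j path hj hjL hf
    rw [pathCalcLoopA]
    by_cases hlt : j < L
    · have hnd : ¬ nN ∣ j * d := by
        rw [hdvd, ← hL]
        intro hdv
        exact absurd (Nat.le_of_dvd (Nat.lt_of_lt_of_le Nat.zero_lt_one hj) hdv)
          (Nat.not_le.mpr hlt)
      have hne : j * d % nN + 1 ≠ 1 := by
        intro hcontra
        exact hnd (Nat.dvd_iff_mod_eq_zero.mpr (by omega))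
      simp only [hne, ne_eq]
      have hstep : j * d + d = (j + 1) * d := by ring
      rw [hstep, ih (j + 1) _ (by omega) (by omega) (by omega)]
      have hrange : List.range' j (L - j) = j :: List.range' (j + 1) (L - (j + 1)) := by
        have : L - j = (L - (j + 1)) + 1 := by omega
        rw [this, List.range'_succ]
      rw [hrange]
      simp [walkStr]
    · have hjeq : j = L := by omega
      subst hjeq
      have hdv : nN ∣ j * d := (hdvd j).mpr (hL ▸ dvd_refl j)
      have heq : j * d % nN + 1 = 1 := by
        have h0 : j * d % nN = 0 := Nat.dvd_iff_mod_eq_zero.mp hdv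
        omega
      simp [heq]

theorem segB_spec (nN d : Nat) : ∀ (fuel lo hi : Nat), hi - lo ≤ fuel → lo < hi →
    segB nN d fuel lo hi = ((List.range' lo (hi - lo)).map (walkChars nN d)).flatten := by
  intro fuel
  induction fuel with
  | zero => intro lo hi hk hlt; omega
  | succ fuel ih =>
    intro lo hi hk hlt
    rw [segB]
    by_cases h1 : hi - lo = 1
    · simp [h1, walkChars]
    · have h2 : ¬ hi ≤ lo := by omega
      have hk2 : 2 ≤ hi - lo := by omega
      simp only [h1, if_false, h2, if_false]
      have hmidlo : lo < (lo + hi) / 2 := by omega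
      have hmidhi : (lo + hi) / 2 < hi := by omega
      rw [ih lo ((lo + hi) / 2) (by omega) hmidlo,
          ih ((lo + hi) / 2) hi (by omega) hmidhi]
      rw [← List.flatten_append, ← List.map_append]
      have e1 : lo + ((lo + hi) / 2 - lo) = (lo + hi) / 2 := by omega
      have e2 : ((lo + hi) / 2 - lo) + (hi - (lo + hi) / 2) = hi - lo := by omega
      have : List.range' lo ((lo + hi) / 2 - lo) ++ List.range' ((lo + hi) / 2) (hi - (lo + hi) / 2)
          = List.range' lo (hi - lo) := by
        calc List.range' lo ((lo + hi) / 2 - lo) ++ List.range' ((lo + hi) / 2) (hi - (lo + hi) / 2)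
            = List.range' lo ((lo + hi) / 2 - lo)
                ++ List.range' (lo + ((lo + hi) / 2 - lo)) (hi - (lo + hi) / 2) := by rw [e1]
          _ = List.range' lo (((lo + hi) / 2 - lo) + (hi - (lo + hi) / 2)) := List.range'_append_1 ..
          _ = List.range' lo (hi - lo) := by rw [e2]
      rw [this]

theorem flatten_intersperse_nil {α : Type} (xss : List (List α)) :
    (List.intersperse ([] : List α) xss).flatten = xss.flatten := by
  induction xss with
  | nil => rfl
  | cons x xss ih =>
    cases xss with
    | nil => rfl
    | cons y yss =>
      simp only [List.intersperse, List.flatten_cons] at *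
      rw [ih]
      simp

theorem chars_eq (nN d : Nat) (hn : 0 < nN) :
    (PySem.Str.join "" (pathCalcLoopA nN d nN d ["1"])).toList
      = segB nN d (nN / Nat.gcd nN d) 0 (nN / Nat.gcd nN d) := by
  set L := nN / Nat.gcd nN d with hL
  have hg0 : 0 < Nat.gcd nN d := Nat.gcd_pos_of_pos_left d hn
  have hL1 : 1 ≤ L := Nat.div_pos (Nat.gcd_le_left d hn) hg0
  have hLn : L ≤ nN := Nat.div_le_self nN _
  have hA := loopA_spec nN d hn L hL nN 1 ["1"] (le_refl 1) hL1 (by omega)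
  rw [one_mul] at hA
  rw [hA]
  have hlist : ["1"] ++ (List.range' 1 (L - 1)).map (walkStr nN d)
      = (List.range' 0 L).map (walkStr nN d) := by
    have hr : List.range' 0 L = 0 :: List.range' 1 (L - 1) := by
      have hL' : L = (L - 1) + 1 := by omega
      rw [hL', List.range'_succ]
      simp
    have h1 : PySem.Int.toStr 1 = "1" := by decide
    have h0 : walkStr nN d 0 = "1" := by simp [walkStr, h1]
    rw [hr]
    simp [h0]
  rw [hlist, segB_spec nN d L 0 L (by omega) (by omega), PySem.Str.toList_join]
  rw [Nat.sub_zero]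
  simp only [List.map_map]
  rw [show String.toList ∘ walkStr nN d = walkChars nN d from funext (walkStr_toList nN d)]
  simp only [PySem.Chars.join, List.intercalate]
  have : ("" : String).toList = [] := rfl
  rw [this, flatten_intersperse_nil]

-- ===== VERDICT (by name: the statement is the Claim_ definition above) =====
theorem path_calc_spec : Claim_equal_path_calc := by
  intro n m _ hpre
  obtain ⟨hn, hm⟩ := hpre
  unfold Spec_path_calc path_calc path_calc_alt
  have hcond : ¬ (n < 1 ∨ m < 1) := by omega
  simp only [hcond, if_false]
  rw [gcdB_eq _ _ _ (le_refl _), PySem.Int.ofStr?]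
  rw [chars_eq n.toNat (m - 1).toNat (by omega)]
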